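-- pv_equiv track=rewrite | github.com/mm3l/Codility | StoneWall/StoneWall.py | solution
-- ===== SOURCE A (Python) =====
-- def solution(H):
--     """
--     StoneWall
--     Cover "Manhattan skyline" using the minimum number of rectangles.
--     """
--
--     N = len(H)
--     stones = 0
--     stack = [0] * N
--     stack_num = 0
--
--     for i in range(N):
--         while stack_num > 0 and stack[stack_num - 1] > H[i]: # the stone wall between the two edges cannot be lower than them
--             stack_num -= 1
--         if stack_num > 0 and stack[stack_num - 1] == H[i]: # if the two horizontal edges are adjacent to the same stone block, they must be at the same height.
--             pass
--         else:
--             stones += 1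
--             stack[stack_num] = H[i]
--             stack_num += 1
--
--     return stones
-- ===== SOURCE B (Python) =====
-- def solution(H):
--     """
--     StoneWall
--     Cover "Manhattan skyline" using the minimum number of rectangles.
--
--     Divide and conquer by minimum-splitting: a segment needs one rectangle for
--     the band between its base and its minimum height (unless they coincide),
--     and splits at the leftmost minimum into two independent sub-segments whose
--     base is that minimum.  Pending segments are kept on an explicit stack so
--     deep (e.g. monotone) inputs cause no recursion-depth issues.
--     """
--     N = len(H)
--     stones = 0
--     work = [(0, N, None)]
--     while work:
--         l, r, base = work.pop()
--         if l >= r: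
--             continue
--         q = l
--         for k in range(l + 1, r):
--             if H[k] < H[q]:
--                 q = k
--         m = H[q]
--         if base is None or m > base:
--             stones += 1
--         work.append((l, q, m))
--         work.append((q + 1, r, m))
--     return stones
-- ===== Notes on version B (the rewrite author's own statement) =====
-- stated objective: alternative
-- what changed: Replaces A's left-to-right monotonic-stack sweep by divide-and-conquer minimum-splitting: each pending segment (kept on an explicit work stack) contributes one rectangle when its minimum exceeds its base and is split at its leftmost minimum into two sub-segments with that minimum as new base.
import Mathlib
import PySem

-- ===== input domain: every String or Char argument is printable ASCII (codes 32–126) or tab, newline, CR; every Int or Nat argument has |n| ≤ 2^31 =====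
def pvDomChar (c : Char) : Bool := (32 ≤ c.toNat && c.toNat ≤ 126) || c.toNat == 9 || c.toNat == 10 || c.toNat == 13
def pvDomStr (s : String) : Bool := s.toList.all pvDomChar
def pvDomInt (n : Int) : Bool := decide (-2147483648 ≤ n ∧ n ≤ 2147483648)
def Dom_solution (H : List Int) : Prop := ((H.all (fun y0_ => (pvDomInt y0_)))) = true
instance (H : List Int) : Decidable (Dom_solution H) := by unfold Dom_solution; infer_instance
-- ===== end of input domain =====

-- B replaces A's monotonic-stack sweep by divide-and-conquer minimum-splitting over
-- index segments kept on an explicit work stack (a different algorithm of similar cost);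
-- equivalence is proved for all inputs.

-- ===== PORT A =====
-- the while loop 'while stack_num > 0 and stack[stack_num-1] > H[i]': the live stack
-- entries (stack[0..stack_num-1]) are modeled as a List Int with head = top.
def pvPopA (x : Int) : List Int → List Int
  | [] => []
  | t :: r => if t > x then pvPopA x r else t :: r

-- the for loop over H; state = (live stack, stones)
def pvALoop : List Int → List Int → Int → Int
  | [], _, stones => stones
  | x :: rest, st, stones =>
    let st' := pvPopA x st
    if st'.head? = some x then pvALoop rest st' stones        -- 'pass' branch
    else pvALoop rest (x :: st') (stones + 1)                  -- push and count

def solution (H : List Int) : Int := pvALoop H [] 0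

-- ===== PORT B =====
-- 'q = l; for k in range(l+1, r): if H[k] < H[q]: q = k' — the leftmost-argmin scan of Source B
def pvArgmin (H : List Int) (l r : Nat) : Nat :=
  (List.range' (l + 1) (r - (l + 1))).foldl
    (fun q k => if H.getD k 0 < H.getD q 0 then k else q) l

-- termination helpers for pvBWork (cited in its decreasing_by)
lemma pvArgmin_cases (H : List Int) (l r : Nat) :
    pvArgmin H l r = l ∨ pvArgmin H l r ∈ List.range' (l + 1) (r - (l + 1)) := by
  unfold pvArgmin
  generalize List.range' (l + 1) (r - (l + 1)) = ks
  induction ks generalizing l with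
  | nil => exact Or.inl rfl
  | cons k ks ih =>
    simp only [List.foldl_cons]
    rcases ih (if H.getD k 0 < H.getD l 0 then k else l) with h | h
    · rw [h]
      split
      · exact Or.inr (List.mem_cons_self)
      · exact Or.inl rfl
    · exact Or.inr (List.mem_cons_of_mem _ h)

lemma pvArgmin_ge (H : List Int) (l r : Nat) : l ≤ pvArgmin H l r := by
  rcases pvArgmin_cases H l r with h | h
  · omega
  · have := (List.mem_range'_1.mp h).1; omega

lemma pvArgmin_lt (H : List Int) (l r : Nat) (h : l < r) : pvArgmin H l r < r := by
  rcases pvArgmin_cases H l r with h' | h'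
  · omega
  · have := (List.mem_range'_1.mp h').2; omega

-- the 'while work:' loop of Source B; the python list used as a stack becomes a List with
-- head = top (work.pop() = head; the two appends push, so the right segment is on top).
def pvBWork (H : List Int) : List (Nat × Nat × Option Int) → Int → Int
  | [], stones => stones
  | (l, r, base) :: work, stones =>
    if r ≤ l then pvBWork H work stones
    else
      let q := pvArgmin H l r
      let m := H.getD q 0
      let stones' := if (match base with | none => true | some b => decide (b < m))
        then stones + 1 else stones
      pvBWork H ((q + 1, r, some m) :: (l, q, some m) :: work) stones'
termination_by work _ => (work.map (fun s => 2 * (s.2.1 - s.1) + 1)).sum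
decreasing_by
  · simp only [List.map_cons, List.sum_cons]; omega
  · have h1 := pvArgmin_ge H l r
    have h2 := pvArgmin_lt H l r (by omega)
    simp only [List.map_cons, List.sum_cons]
    omega

def solution_alt (H : List Int) : Int := pvBWork H [(0, H.length, none)] 0

-- ===== PRECONDITION & SPEC =====
def Spec_solution (H : List Int) (out : Int) : Prop := out = solution_alt H
instance (H : List Int) (out : Int) : Decidable (Spec_solution H out) := by unfold Spec_solution; infer_instance

-- ===== CLAIM (what is proved, stated in full; the proofs are below) =====
def Claim_equal_solution : Prop := ∀ (H : List Int), Dom_solution H → Spec_solution H (solution H)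

-- ===== LEMMAS AND PROOFS =====

-- 'height z is already visible at position i, looking back no further than l':
-- some earlier j in [l, i) carries height z with everything strictly between higher.
def HasDup (H : List Int) (l i : Nat) (z : Int) : Prop :=
  ∃ j, l ≤ j ∧ j < i ∧ H.getD j 0 = z ∧ ∀ k, j < k → k < i → z < H.getD k 0

-- computable form of HasDup
def hasDupB (H : List Int) (l i : Nat) (z : Int) : Bool :=
  (List.range' l (i - l)).any (fun j =>
    (H.getD j 0 == z) &&
    ((List.range' (j + 1) (i - (j + 1))).all (fun k => decide (z < H.getD k 0))))

lemma hasDupB_iff (H : List Int) (l i : Nat) (z : Int) (hli : l ≤ i) :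
    hasDupB H l i z = true ↔ HasDup H l i z := by
  simp only [hasDupB, HasDup, List.any_eq_true, List.all_eq_true, List.mem_range'_1,
    Bool.and_eq_true, beq_iff_eq, decide_eq_true_eq]
  constructor
  · rintro ⟨j, ⟨hj1, hj2⟩, hEq, hall⟩
    exact ⟨j, hj1, by omega, hEq, fun k hk1 hk2 => hall k ⟨by omega, by omega⟩⟩
  · rintro ⟨j, hj1, hj2, hEq, hall⟩
    exact ⟨j, ⟨hj1, by omega⟩, hEq, fun k hk => hall k (by omega) (by omega)⟩

lemma hasDup_succ (H : List Int) (l i : Nat) (z : Int) (hli : l ≤ i) :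
    HasDup H l (i + 1) z ↔ (H.getD i 0 = z ∨ (z < H.getD i 0 ∧ HasDup H l i z)) := by
  constructor
  · rintro ⟨j, hj1, hj2, hEq, hall⟩
    by_cases hji : j = i
    · subst hji; exact Or.inl hEq
    · refine Or.inr ⟨hall i (by omega) (by omega), j, hj1, by omega, hEq,
        fun k hk1 hk2 => hall k hk1 (by omega)⟩
  · rintro (h | ⟨hlt, j, hj1, hj2, hEq, hall⟩)
    · exact ⟨i, hli, by omega, h, fun k hk1 hk2 => by omega⟩
    · refine ⟨j, hj1, by omega, hEq, fun k hk1 hk2 => ?_⟩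
      by_cases hki : k = i
      · subst hki; exact hlt
      · exact hall k hk1 (by omega)

-- ---- A-side stack lemmas ----
lemma popA_pairwise (x : Int) (st : List Int) (h : st.Pairwise (· > ·)) :
    (pvPopA x st).Pairwise (· > ·) := by
  induction st with
  | nil => simp [pvPopA]
  | cons t r ih =>
    simp only [pvPopA]
    split
    · exact ih (List.Pairwise.of_cons h)
    · exact h

lemma popA_le (x : Int) (st : List Int) (h : st.Pairwise (· > ·)) :
    ∀ z ∈ pvPopA x st, z ≤ x := by
  induction st with
  | nil => simp [pvPopA]
  | cons t r ih =>
    simp only [pvPopA]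
    split
    · exact ih (List.Pairwise.of_cons h)
    · rename_i ht
      intro z hz
      rcases List.mem_cons.mp hz with h1 | h1
      · omega
      · have := (List.pairwise_cons.mp h).1 z h1
        omega

lemma popA_mem (x z : Int) (st : List Int) (hz : z ≤ x) :
    z ∈ pvPopA x st ↔ z ∈ st := by
  induction st with
  | nil => simp [pvPopA]
  | cons t r ih =>
    simp only [pvPopA]
    split
    · rename_i ht
      rw [ih]
      simp only [List.mem_cons]
      constructor
      · exact Or.inr
      · rintro (h | h)
        · omega
        · exact h
    · rfl

lemma popA_head_of_mem (x : Int) (st : List Int) (hp : st.Pairwise (· > ·))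
    (hx : x ∈ st) : (pvPopA x st).head? = some x := by
  have hx' : x ∈ pvPopA x st := (popA_mem x x st le_rfl).mpr hx
  cases hst : pvPopA x st with
  | nil => rw [hst] at hx'; simp at hx'
  | cons t r =>
    rw [hst] at hx'
    have hp' := popA_pairwise x st hp
    rw [hst] at hp'
    have ht : t ≤ x := popA_le x st hp t (by rw [hst]; exact List.mem_cons_self)
    rcases List.mem_cons.mp hx' with h | h
    · simp [h]
    · have := (List.pairwise_cons.mp hp').1 x h
      omega


lemma popA_not_mem (x : Int) (st : List Int) (hp : st.Pairwise (· > ·))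
    (hh : (pvPopA x st).head? ≠ some x) : x ∉ st :=
  fun hx => hh (popA_head_of_mem x st hp hx)

-- index facts from H.drop i = x :: rest
lemma drop_head (H rest : List Int) (x : Int) (i : Nat) (h : H.drop i = x :: rest) :
    H.getD i 0 = x := by
  have h0 : (H.drop i)[0]? = some x := by rw [h]; rfl
  rw [List.getElem?_drop] at h0
  simp only [Nat.add_zero] at h0
  simp [List.getD_eq_getElem?_getD, h0]

lemma drop_tail (H rest : List Int) (x : Int) (i : Nat) (h : H.drop i = x :: rest) :
    H.drop (i + 1) = rest := by
  have : H.drop (i + 1) = (H.drop i).drop 1 := by rw [List.drop_drop]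
  rw [this, h]
  rfl

-- A's loop counts the indices whose height is not yet visible
lemma aLoop_eq (H : List Int) :
    ∀ (rest st : List Int) (stones : Int) (i : Nat),
      H.drop i = rest →
      st.Pairwise (· > ·) →
      (∀ z : Int, z ∈ st ↔ HasDup H 0 i z) →
      pvALoop rest st stones =
        stones + (((List.range' i rest.length).filter
          (fun k => !hasDupB H 0 k (H.getD k 0))).length : Int) := by
  intro rest
  induction rest with
  | nil => intro st stones i _ _ _; simp [pvALoop]
  | cons x rest' ih =>
    intro st stones i hdrop hpair hmem
    have hx : H.getD i 0 = x := drop_head H rest' x i hdrop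
    have hdrop' : H.drop (i + 1) = rest' := drop_tail H rest' x i hdrop
    set st' : List Int := pvPopA x st with hst'
    have hpair' : st'.Pairwise (· > ·) := popA_pairwise x st hpair
    have hsucc : ∀ z : Int, HasDup H 0 (i + 1) z ↔
        (x = z ∨ (z < x ∧ HasDup H 0 i z)) := by
      intro z; rw [hasDup_succ H 0 i z (Nat.zero_le i), hx]
    have hrange : List.range' i (rest'.length + 1) = i :: List.range' (i + 1) rest'.length :=
      List.range'_succ
    by_cases hh : st'.head? = some x
    · -- 'pass' branch: x is on the stack ⇒ HasDup at i
      have hxst : x ∈ st := by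
        by_contra hc
        have : x ∉ pvPopA x st := by
          intro hmem'
          exact hc ((popA_mem x x st le_rfl).mp hmem')
        rw [← hst'] at this
        cases hds : st' with
        | nil => rw [hds] at hh; simp at hh
        | cons t r =>
          rw [hds] at hh this
          simp only [List.head?_cons, Option.some.injEq] at hh
          exact this (hh ▸ List.mem_cons_self)
      have hdup : HasDup H 0 i x := (hmem x).mp hxst
      have hdupB : hasDupB H 0 i (H.getD i 0) = true := by
        rw [hx]; exact (hasDupB_iff H 0 i x (Nat.zero_le i)).mpr hdup
      have hA : pvALoop (x :: rest') st stones = pvALoop rest' st' stones := by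
        simp only [pvALoop]
        rw [if_pos hh]
      rw [hA, ih st' stones (i + 1) hdrop' hpair' ?_]
      · rw [List.length_cons, hrange]
        simp only [List.filter_cons, hdupB, Bool.not_true, Bool.false_eq_true, reduceIte]
      · intro z
        rw [hsucc z]
        rcases lt_trichotomy z x with hzx | hzx | hzx
        · rw [hst', popA_mem x z st (by omega), hmem z]
          constructor
          · exact fun h => Or.inr ⟨hzx, h⟩
          · rintro (h | h)
            · omega
            · exact h.2
        · subst hzx
          refine iff_of_true ?_ (Or.inl rfl)
          rw [hst', popA_mem z z st le_rfl]
          exact hxst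
        · refine iff_of_false ?_ ?_
          · intro hzin
            have := popA_le x st hpair z hzin
            omega
          · rintro (h | h) <;> omega
    · -- push branch: x not on the stack ⇒ no HasDup at i
      have hxst : x ∉ st := popA_not_mem x st hpair hh
      have hdup : ¬ HasDup H 0 i x := fun h => hxst ((hmem x).mpr h)
      have hdupB : hasDupB H 0 i (H.getD i 0) = false := by
        rw [hx]
        by_contra hc
        rw [Bool.not_eq_false] at hc
        exact hdup ((hasDupB_iff H 0 i x (Nat.zero_le i)).mp hc)
      have hA : pvALoop (x :: rest') st stones = pvALoop rest' (x :: st') (stones + 1) := by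
        simp only [pvALoop]
        rw [if_neg hh]
      have hpair'' : (x :: st').Pairwise (· > ·) := by
        rw [List.pairwise_cons]
        refine ⟨fun z hz => ?_, hpair'⟩
        have h1 := popA_le x st hpair z hz
        have h2 : z ≠ x := by
          intro h; subst h
          exact hxst ((popA_mem z z st le_rfl).mp hz)
        omega
      rw [hA, ih (x :: st') (stones + 1) (i + 1) hdrop' hpair'' ?_]
      · rw [List.length_cons, hrange]
        simp only [List.filter_cons, hdupB, Bool.not_false, if_pos,
          List.length_cons]
        push_cast
        ring
      · intro z
        rw [hsucc z]
        rcases lt_trichotomy z x with hzx | hzx | hzx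
        · simp only [List.mem_cons]
          rw [hst', popA_mem x z st (by omega), hmem z]
          constructor
          · rintro (h | h)
            · omega
            · exact Or.inr ⟨hzx, h⟩
          · rintro (h | h)
            · omega
            · exact Or.inr h.2
        · subst hzx
          exact iff_of_true List.mem_cons_self (Or.inl rfl)
        · refine iff_of_false ?_ ?_
          · intro hzin
            rcases List.mem_cons.mp hzin with h | h
            · omega
            · have := popA_le x st hpair z h
              omega
          · rintro (h | h) <;> omega

-- ---- B-side ----

-- base test of Source B ('base is None or m > base')
def condB : Option Int → Int → Bool
  | none, _ => true
  | some b, x => decide (b < x)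

-- what one segment (l, r, base) contributes: the indices of [l, r) whose height exceeds
-- the base and is not yet visible within the segment
def segCnt (H : List Int) (l r : Nat) (b : Option Int) : Nat :=
  ((List.range' l (r - l)).filter
    (fun i => condB b (H.getD i 0) && !hasDupB H l i (H.getD i 0))).length

-- full argmin specification
lemma argmin_spec (H : List Int) (l r : Nat) (hlr : l < r) :
    (∀ k, l ≤ k → k < r → H.getD (pvArgmin H l r) 0 ≤ H.getD k 0) ∧
    (∀ k, l ≤ k → k < pvArgmin H l r → H.getD (pvArgmin H l r) 0 < H.getD k 0) := by
  have main : ∀ n : Nat,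
      let q := (List.range' (l + 1) n).foldl
        (fun q k => if H.getD k 0 < H.getD q 0 then k else q) l
      (l ≤ q ∧ q < l + 1 + n) ∧
      (∀ k, l ≤ k → k < l + 1 + n → H.getD q 0 ≤ H.getD k 0) ∧
      (∀ k, l ≤ k → k < q → H.getD q 0 < H.getD k 0) := by
    intro n
    induction n with
    | zero =>
      simp only [List.range'_zero, List.foldl_nil]
      refine ⟨⟨le_rfl, by omega⟩, fun k hk1 hk2 => ?_, fun k hk1 hk2 => by omega⟩
      have hkl : k = l := by omega
      subst hkl; rfl
    | succ n ih =>
      rw [List.range'_concat]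
      simp only [List.foldl_append, List.foldl_cons, List.foldl_nil, one_mul] at *
      obtain ⟨⟨hq1, hq2⟩, hmin, hleft⟩ := ih
      set q := (List.range' (l + 1) n).foldl
        (fun q k => if H.getD k 0 < H.getD q 0 then k else q) l with hqdef
      by_cases hc : H.getD (l + 1 + n) 0 < H.getD q 0
      · rw [if_pos hc]
        refine ⟨⟨by omega, by omega⟩, fun k hk1 hk2 => ?_, fun k hk1 hk2 => ?_⟩
        · by_cases hk : k = l + 1 + n
          · subst hk; rfl
          · exact le_of_lt (lt_of_lt_of_le hc (hmin k hk1 (by omega)))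
        · exact lt_of_lt_of_le hc (hmin k hk1 (by omega))
      · rw [if_neg hc]
        refine ⟨⟨hq1, by omega⟩, fun k hk1 hk2 => ?_, hleft⟩
        by_cases hk : k = l + 1 + n
        · subst hk; omega
        · exact hmin k hk1 (by omega)
  have h := main (r - (l + 1))
  have harith : l + 1 + (r - (l + 1)) = r := by omega
  rw [harith] at h
  exact ⟨h.2.1, h.2.2⟩

-- the segment-split identity: the contribution of (l, r, base) is the band at the minimum
-- plus the contributions of the two sub-segments
lemma segCnt_split (H : List Int) (l r : Nat) (b : Option Int) (hlr : l < r)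
    (hbase : ∀ x, b = some x → ∀ k, l ≤ k → k < r → x ≤ H.getD k 0) :
    segCnt H l r b =
      segCnt H l (pvArgmin H l r) (some (H.getD (pvArgmin H l r) 0)) +
      (if condB b (H.getD (pvArgmin H l r) 0) then 1 else 0) +
      segCnt H (pvArgmin H l r + 1) r (some (H.getD (pvArgmin H l r) 0)) := by
  set q := pvArgmin H l r with hq
  set m := H.getD q 0 with hm
  have hql : l ≤ q := pvArgmin_ge H l r
  have hqr : q < r := pvArgmin_lt H l r hlr
  obtain ⟨hmin, hleft⟩ := argmin_spec H l r hlr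
  rw [← hq, ← hm] at hmin hleft
  have hmb : ∀ x, b = some x → x ≤ m := fun x hx => hbase x hx q hql hqr
  -- split the index range at q
  have hsplit : List.range' l (r - l) =
      List.range' l (q - l) ++ q :: List.range' (q + 1) (r - (q + 1)) := by
    have h1 : List.range' l (q - l) ++ List.range' (l + 1 * (q - l)) (1 + (r - (q + 1))) =
        List.range' l ((q - l) + (1 + (r - (q + 1)))) := List.range'_append
    have h2 : l + 1 * (q - l) = q := by omega
    have h3 : (q - l) + (1 + (r - (q + 1))) = r - l := by omega
    have h4 : 1 + (r - (q + 1)) = (r - (q + 1)) + 1 := by omega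
    rw [h2, h3, h4, List.range'_succ] at h1
    exact h1.symm
  unfold segCnt
  rw [hsplit, List.filter_append, List.filter_cons, List.length_append]
  -- left part: predicates agree
  have hleftpart : ∀ i ∈ List.range' l (q - l),
      (condB b (H.getD i 0) && !hasDupB H l i (H.getD i 0)) =
      (condB (some m) (H.getD i 0) && !hasDupB H l i (H.getD i 0)) := by
    intro i hi
    obtain ⟨hi1, hi2⟩ := List.mem_range'_1.mp hi
    have hgt : m < H.getD i 0 := hleft i hi1 (by omega)
    have hcb : condB b (H.getD i 0) = true := by
      cases b with
      | none => rfl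
      | some x =>
        simp only [condB, decide_eq_true_eq]
        have := hmb x rfl
        omega
    have hcm : condB (some m) (H.getD i 0) = true := by
      simp only [condB, decide_eq_true_eq]; exact hgt
    rw [hcb, hcm]
  rw [List.filter_congr hleftpart]
  -- the pivot: never a duplicate within [l, q)
  have hqdup : hasDupB H l q m = false := by
    by_contra hc
    rw [Bool.not_eq_false] at hc
    obtain ⟨j, hj1, hj2, hEq, _⟩ := (hasDupB_iff H l q m hql).mp hc
    have := hleft j hj1 hj2
    omega
  -- right part: predicates agree
  have hrightpart : ∀ i ∈ List.range' (q + 1) (r - (q + 1)),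
      (condB b (H.getD i 0) && !hasDupB H l i (H.getD i 0)) =
      (condB (some m) (H.getD i 0) && !hasDupB H (q + 1) i (H.getD i 0)) := by
    intro i hi
    obtain ⟨hi1, hi2⟩ := List.mem_range'_1.mp hi
    have hge : m ≤ H.getD i 0 := hmin i (by omega) (by omega)
    rcases eq_or_lt_of_le hge with hx | hx
    · -- height equals the minimum: both predicates are false
      have hcm : condB (some m) (H.getD i 0) = false := by
        simp only [condB, decide_eq_false_iff_not]; omega
      have hdup : HasDup H l i (H.getD i 0) := by
        -- the latest occurrence of m in [q, i) works as witness
        set P : Nat → Prop := fun j => H.getD j 0 = m ∧ q ≤ j with hP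
        have hPdec : DecidablePred P := fun j => by
          rw [hP]; infer_instance
        set j0 := Nat.findGreatest P (i - 1) with hj0
        have hPq : P q := ⟨rfl, le_rfl⟩
        have hqi : q ≤ i - 1 := by omega
        have hj0q : q ≤ j0 := Nat.le_findGreatest hqi hPq
        have hj0spec : P j0 := Nat.findGreatest_spec hqi hPq
        have hj0le : j0 ≤ i - 1 := Nat.findGreatest_le (i - 1)
        refine ⟨j0, by omega, by omega, by rw [hj0spec.1, ← hx], fun k hk1 hk2 => ?_⟩
        have hnk : ¬ P k := Nat.findGreatest_is_greatest hk1 (by omega)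
        have hkm : H.getD k 0 ≠ m := by
          intro hc
          exact hnk ⟨hc, by omega⟩
        have hkge : m ≤ H.getD k 0 := hmin k (by omega) (by omega)
        rw [← hx]
        omega
      have hdupB : hasDupB H l i (H.getD i 0) = true :=
        (hasDupB_iff H l i (H.getD i 0) (by omega)).mpr hdup
      rw [hcm, hdupB]
      simp
    · -- height strictly above the minimum
      have hcb : condB b (H.getD i 0) = true := by
        cases b with
        | none => rfl
        | some x =>
          simp only [condB, decide_eq_true_eq]
          have := hmb x rfl
          omega
      have hcm : condB (some m) (H.getD i 0) = true := by
        simp only [condB, decide_eq_true_eq]; exact hx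
      have hdupiff : HasDup H l i (H.getD i 0) ↔ HasDup H (q + 1) i (H.getD i 0) := by
        constructor
        · rintro ⟨j, hj1, hj2, hEq, hall⟩
          refine ⟨j, ?_, hj2, hEq, hall⟩
          by_contra hc
          rcases Nat.lt_or_ge j q with hjq | hjq
          · have := hall q hjq (by omega)
            omega
          · have hjq' : j = q := by omega
            rw [hjq', ← hm] at hEq
            omega
        · rintro ⟨j, hj1, hj2, hEq, hall⟩
          exact ⟨j, by omega, hj2, hEq, hall⟩
      have hdeq : hasDupB H l i (H.getD i 0) = hasDupB H (q + 1) i (H.getD i 0) := by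
        rw [Bool.eq_iff_iff, hasDupB_iff H l i _ (by omega),
          hasDupB_iff H (q + 1) i _ (by omega)]
        exact hdupiff
      rw [hcb, hcm, hdeq]
  rw [List.filter_congr hrightpart]
  -- assemble
  rw [hm, hqdup]
  simp only [Bool.not_false, Bool.and_true]
  split <;> simp <;> omega

-- the work-stack loop of B adds the contribution of every pending segment
lemma bWork_eq (H : List Int) :
    ∀ (n : Nat) (work : List (Nat × Nat × Option Int)) (stones : Int),
      (work.map (fun s => 2 * (s.2.1 - s.1) + 1)).sum < n →
      (∀ s ∈ work, ∀ x, s.2.2 = some x → ∀ k, s.1 ≤ k → k < s.2.1 → x ≤ H.getD k 0) →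
      pvBWork H work stones =
        stones + ((work.map (fun s => (segCnt H s.1 s.2.1 s.2.2 : Int))).sum) := by
  intro n
  induction n with
  | zero => intro work stones h _; omega
  | succ n ih =>
    intro work stones hmeas hinv
    match work with
    | [] => simp [pvBWork]
    | (l, r, base) :: rest =>
      rw [pvBWork]
      by_cases hlr : r ≤ l
      · rw [if_pos hlr]
        rw [ih rest stones (by simp only [List.map_cons, List.sum_cons] at hmeas; omega)
          (fun s hs => hinv s (List.mem_cons_of_mem _ hs))]
        have : segCnt H l r base = 0 := by
          unfold segCnt
          have : r - l = 0 := by omega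
          rw [this]
          rfl
        simp [this]
      · rw [if_neg hlr]
        set q := pvArgmin H l r with hq
        set m := H.getD q 0 with hm
        have hql : l ≤ q := pvArgmin_ge H l r
        have hqr : q < r := pvArgmin_lt H l r (by omega)
        obtain ⟨hmin, hleftm⟩ := argmin_spec H l r (by omega)
        rw [← hq, ← hm] at hmin hleftm
        have hinv' : ∀ s ∈ ((q + 1, r, some m) :: (l, q, some m) :: rest),
            ∀ x, s.2.2 = some x → ∀ k, s.1 ≤ k → k < s.2.1 → x ≤ H.getD k 0 := by
          intro s hs
          rcases List.mem_cons.mp hs with hs | hs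
          · subst hs
            intro x hx k hk1 hk2
            simp only at hx hk1 hk2
            have hx' : m = x := by simpa using hx
            subst hx'
            exact hmin k (by omega) hk2
          rcases List.mem_cons.mp hs with hs | hs
          · subst hs
            intro x hx k hk1 hk2
            simp only at hx hk1 hk2
            have hx' : m = x := by simpa using hx
            subst hx'
            exact le_of_lt (hleftm k hk1 hk2)
          · exact hinv s (List.mem_cons_of_mem _ hs)
        have hmeas' : (((q + 1, r, some m) :: (l, q, some m) :: rest).map
            (fun s => 2 * (s.2.1 - s.1) + 1)).sum < n := by
          simp only [List.map_cons, List.sum_cons] at hmeas ⊢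
          omega
        rw [ih _ _ hmeas' hinv']
        have hsplit := segCnt_split H l r base (by omega)
          (fun x hx k => hinv (l, r, base) List.mem_cons_self x hx k)
        rw [← hq, ← hm] at hsplit
        simp only [List.map_cons, List.sum_cons]
        rw [← hm, hsplit]
        cases base with
        | none =>
          simp only [condB]
          push_cast
          ring
        | some b =>
          simp only [condB]
          split <;> push_cast <;> ring

-- ===== VERDICT (by name: the statement is the Claim_ definition above) =====
theorem solution_spec : Claim_equal_solution := by
  intro H _
  unfold Spec_solution solution solution_alt
  have hA := aLoop_eq H H [] 0 0 (by simp) (by simp)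
    (fun z => by
      simp only [List.not_mem_nil, false_iff]
      rintro ⟨j, _, hj, _, _⟩
      omega)
  have hB := bWork_eq H (2 * H.length + 2) [(0, H.length, none)] 0
    (by simp only [List.map_cons, List.map_nil, List.sum_cons, List.sum_nil]; omega)
    (by rintro s hs x hx k hk1 hk2
        rcases List.mem_cons.mp hs with hs | hs
        · subst hs; simp at hx
        · simp at hs)
  rw [hA, hB]
  simp only [List.map_cons, List.map_nil, List.sum_cons, List.sum_nil]
  have : segCnt H 0 H.length none =
      ((List.range' 0 H.length).filter
        (fun k => !hasDupB H 0 k (H.getD k 0))).length := by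
    unfold segCnt
    rw [Nat.sub_zero]
    refine congrArg List.length (List.filter_congr ?_)
    intro i _
    simp [condB]
  rw [this]
  simp
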